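-- pv_equiv track=rewrite | github.com/Ssong-Q/-Coding-Test-Algorithm | 프로그래머스/unrated/181893. 배열 조각하기/배열 조각하기.py | solution
-- ===== SOURCE A (Python) =====
-- def solution(arr, query):
--     answer = []
--     for i in range(len(query)):
--         index = query[i]
--         if i % 2 == 0:
--             arr = arr[:index+1]
--         else:
--             arr = arr[index:]
--     return arr
-- ===== SOURCE B (Python) =====
-- def _clamp(j, n):
--     # Python slice-bound normalisation for a window of length n
--     if j < 0:
--         j += n
--     return max(0, min(j, n))
--
-- def solution(arr, query):
--     lo, hi = 0, len(arr)
--     for i, q in enumerate(query):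
--         n = hi - lo
--         if i % 2 == 0:
--             hi = lo + _clamp(q + 1, n)
--         else:
--             lo = lo + _clamp(q, n)
--     return arr[lo:hi]
-- ===== Notes on version B (the rewrite author's own statement) =====
-- stated objective: alternative
-- what changed: B never copies the array: it tracks the surviving window as (lo,hi) offsets, normalising each query bound against the current window length, and takes a single slice at the end, instead of A's materialising a new list slice per query; it avoids A's worst case of repeated large slices but was not measurably faster on the generated inputs.
import Mathlib
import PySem

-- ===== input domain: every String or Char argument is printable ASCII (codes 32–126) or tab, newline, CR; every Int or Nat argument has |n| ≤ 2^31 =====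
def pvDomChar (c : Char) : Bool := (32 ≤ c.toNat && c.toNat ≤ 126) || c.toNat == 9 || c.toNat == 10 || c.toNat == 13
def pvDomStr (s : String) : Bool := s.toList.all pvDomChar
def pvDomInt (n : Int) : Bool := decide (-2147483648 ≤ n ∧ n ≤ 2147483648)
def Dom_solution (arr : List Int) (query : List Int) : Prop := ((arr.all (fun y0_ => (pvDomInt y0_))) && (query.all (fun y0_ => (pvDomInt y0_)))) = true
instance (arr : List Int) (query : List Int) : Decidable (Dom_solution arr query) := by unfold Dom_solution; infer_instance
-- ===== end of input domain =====

-- B replaces A's per-query list slicing by (lo,hi) offset tracking with one final slice (alternative algorithm; not measured faster).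

-- ===== PORT A =====
-- for i in range(len(query)): slice arr per parity of i
def solutionLoop (arr : List Int) (i : Nat) (qs : List Int) : List Int :=
  match qs with
  | [] => arr
  | index :: rest =>
      if i % 2 == 0 then
        solutionLoop (PySem.List.slice arr none (some (index + 1))) (i + 1) rest
      else
        solutionLoop (PySem.List.slice arr (some index) none) (i + 1) rest

def solution (arr : List Int) (query : List Int) : List Int :=
  solutionLoop arr 0 query

-- ===== PORT B =====
-- Python slice-bound normalisation for a window of length n (Source B's _clamp)
def pyClamp (j n : Int) : Int :=
  let j := if j < 0 then j + n else j
  max 0 (min j n)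

def altLoop (lo hi : Int) (i : Nat) (qs : List Int) : Int × Int :=
  match qs with
  | [] => (lo, hi)
  | q :: rest =>
      let n := hi - lo
      if i % 2 == 0 then
        altLoop lo (lo + pyClamp (q + 1) n) (i + 1) rest
      else
        altLoop (lo + pyClamp q n) hi (i + 1) rest

def solution_alt (arr : List Int) (query : List Int) : List Int :=
  let p := altLoop 0 (arr.length : Int) 0 query
  PySem.List.slice arr (some p.1) (some p.2)

-- ===== PRECONDITION & SPEC =====
def Spec_solution (arr : List Int) (query : List Int) (out : List Int) : Prop := out = solution_alt arr query
instance (arr : List Int) (query : List Int) (out : List Int) : Decidable (Spec_solution arr query out) := by unfold Spec_solution; infer_instance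

-- ===== CLAIM (what is proved, stated in full; the proofs are below) =====
def Claim_equal_solution : Prop := ∀ (arr : List Int) (query : List Int), Dom_solution arr query → Spec_solution arr query (solution arr query)

-- ===== LEMMAS AND PROOFS =====

lemma pyClamp_toNat (j n : Int) (hn : 0 ≤ n) :
    (pyClamp j n).toNat = PySem.List.clampIdx n.toNat j ∧ 0 ≤ pyClamp j n ∧ pyClamp j n ≤ n := by
  simp only [pyClamp, PySem.List.clampIdx]
  split_ifs <;> constructor <;> omega

lemma slice_none_some' (xs : List Int) (i : Int) :
    PySem.List.slice xs none (some i) = xs.take (PySem.List.clampIdx xs.length i) := by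
  simp [PySem.List.slice]

lemma loop_eq (qs : List Int) : ∀ (i : Nat) (arr0 : List Int) (lo hi : Int),
    0 ≤ lo → lo ≤ hi → hi ≤ (arr0.length : Int) →
    solutionLoop ((arr0.drop lo.toNat).take (hi - lo).toNat) i qs
      = (arr0.drop (altLoop lo hi i qs).1.toNat).take
          ((altLoop lo hi i qs).2 - (altLoop lo hi i qs).1).toNat
    ∧ 0 ≤ (altLoop lo hi i qs).1 ∧ (altLoop lo hi i qs).1 ≤ (altLoop lo hi i qs).2
    ∧ (altLoop lo hi i qs).2 ≤ (arr0.length : Int) := by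
  induction qs with
  | nil =>
      intro i arr0 lo hi h0 h1 h2
      exact ⟨rfl, h0, h1, h2⟩
  | cons q rest ih =>
      intro i arr0 lo hi h0 h1 h2
      have hlen : ((arr0.drop lo.toNat).take (hi - lo).toNat).length = (hi - lo).toNat := by
        simp [List.length_take, List.length_drop]
        omega
      by_cases hpar : i % 2 == 0
      · -- even step: arr[:q+1]
        obtain ⟨hc, hc0, hcn⟩ := pyClamp_toNat (q + 1) (hi - lo) (by omega)
        have hstep : PySem.List.slice ((arr0.drop lo.toNat).take (hi - lo).toNat) none (some (q + 1))
            = (arr0.drop lo.toNat).take ((lo + pyClamp (q + 1) (hi - lo)) - lo).toNat := by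
          rw [slice_none_some', hlen, List.take_take, ← hc]
          congr 1
          omega
        simp only [solutionLoop, altLoop, hpar, if_true, hstep]
        exact ih (i + 1) arr0 lo (lo + pyClamp (q + 1) (hi - lo)) h0 (by omega) (by omega)
      · -- odd step: arr[q:]
        obtain ⟨hc, hc0, hcn⟩ := pyClamp_toNat q (hi - lo) (by omega)
        have hstep : PySem.List.slice ((arr0.drop lo.toNat).take (hi - lo).toNat) (some q) none
            = (arr0.drop (lo + pyClamp q (hi - lo)).toNat).take (hi - (lo + pyClamp q (hi - lo))).toNat := by
          rw [PySem.List.slice_some_none, hlen, ← hc, List.drop_take, List.drop_drop]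
          congr 1
          · omega
          · congr 1
            omega
        simp only [solutionLoop, altLoop, hpar, hstep]
        exact ih (i + 1) arr0 (lo + pyClamp q (hi - lo)) hi (by omega) (by omega) h2

-- ===== VERDICT (by name: the statement is the Claim_ definition above) =====
theorem solution_spec : Claim_equal_solution := by
  intro arr query _
  unfold Spec_solution solution solution_alt
  obtain ⟨heq, h0, h1, h2⟩ :=
    loop_eq query 0 arr 0 (arr.length : Int) le_rfl (by positivity) le_rfl
  have hstart : ((arr.drop (0 : Int).toNat).take ((arr.length : Int) - 0).toNat) = arr := by
    simp
  rw [hstart] at heq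
  rw [heq, PySem.List.slice_toNat _ h0 (h0.trans h1)]
  congr 1
  omega
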